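-- pv_equiv track=rewrite | github.com/dongdongx2x2/TIL | algorithm_solve/BOJ/gold/1092_ship/sol.py | solve
-- ===== SOURCE A (Python) =====
-- def solve(N, M, lst, lst2):
--     if lst[0] < lst2[0]:
--         return -1
--
--     cnt = 0
--
--     while lst2:
--         for i in lst:
--             if lst2 and i < lst2[-1]:
--                 continue
--             for j in lst2:
--                 if i >= j:
--                     lst2.remove(j)
--                     break
--         cnt += 1
--     return cnt
-- ===== SOURCE B (Python) =====
-- def solve(N, M, lst, lst2):
--     # Two-pointer greedy over the descending-sorted lists: each round walks cranes
--     # and boxes together once, instead of rescanning/removing from lst2 per crane.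
--     # Return-value equivalence only: A empties lst2 in place, B leaves it untouched.
--     if lst[0] < lst2[0]:
--         return -1
--     boxes = lst2
--     cnt = 0
--     while boxes:
--         rem = []
--         j = 0
--         n = len(boxes)
--         for c in lst:
--             while j < n and boxes[j] > c:
--                 rem.append(boxes[j])
--                 j += 1
--             if j >= n:
--                 break
--             j += 1
--         rem.extend(boxes[j:])
--         boxes = rem
--         cnt += 1
--     return cnt
-- ===== Notes on version B (the rewrite author's own statement) =====
-- stated objective: alternative
-- what changed: Each loading round is computed by a single forward two-pointer sweep over the descending crane and box lists (building the remaining-box list once), instead of A's per-crane rescan of lst2 plus list.remove; Pre_ keeps the natural domain (both lists sorted descending, as the BOJ 1092 caller guarantees, or the immediate -1 case) and excludes unsorted inputs past the -1 gate, where A's continue/remove iteration order gives accidental round counts or diverges.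
-- outside the precondition, e.g. on solve(3, 3, [9, 3, 8], [2, 7, 1]): A returns 1, B returns 2
import Mathlib
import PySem

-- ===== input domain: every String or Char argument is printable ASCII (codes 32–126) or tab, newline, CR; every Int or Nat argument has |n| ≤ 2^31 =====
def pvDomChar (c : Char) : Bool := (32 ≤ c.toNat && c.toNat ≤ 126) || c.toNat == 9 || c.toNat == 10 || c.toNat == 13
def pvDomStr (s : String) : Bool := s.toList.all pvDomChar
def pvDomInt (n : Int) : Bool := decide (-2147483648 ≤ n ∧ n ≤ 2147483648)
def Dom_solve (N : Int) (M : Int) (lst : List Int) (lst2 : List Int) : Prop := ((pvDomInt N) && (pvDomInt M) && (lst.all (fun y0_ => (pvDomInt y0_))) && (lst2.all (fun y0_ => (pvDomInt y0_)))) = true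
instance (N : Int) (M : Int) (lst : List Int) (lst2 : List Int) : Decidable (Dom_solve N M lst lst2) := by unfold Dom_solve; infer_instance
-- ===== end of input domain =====

-- B computes each loading round with one forward two-pointer sweep instead of A's
-- per-crane rescan of lst2 with list.remove; return-value equivalence only (A
-- empties lst2 in place, B does not mutate its arguments).

-- ===== PORT A =====
-- inner 'for j in lst2: if i >= j: lst2.remove(j); break'
def findA (c : Int) : List Int → Option Int
  | [] => none
  | j :: rest => if c ≥ j then some j else findA c rest

def innerA (c : Int) (bs : List Int) : List Int :=
  match findA c bs with
  | some j => (PySem.List.remove? bs j).getD bs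
  | none => bs

-- one crane's turn: 'if lst2 and i < lst2[-1]: continue' then the inner loop
def stepA (bs : List Int) (c : Int) : List Int :=
  match PySem.List.pyGet? bs (-1) with
  | some lastv => if c < lastv then bs else innerA c bs
  | none => innerA c bs

-- the 'while lst2' loop; fuel = lst2.length makes the recursion total (under
-- Pre_solve every round removes at least one box, so the fuel never runs out)
def loopA (fuel : Nat) (cs : List Int) (bs : List Int) (cnt : Int) : Int :=
  match fuel with
  | 0 => cnt
  | f + 1 => if bs = [] then cnt else loopA f cs (List.foldl stepA bs cs) (cnt + 1)

def solve (N : Int) (M : Int) (lst : List Int) (lst2 : List Int) : Int :=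
  match PySem.List.pyGet? lst 0, PySem.List.pyGet? lst2 0 with
  | some a, some b => if a < b then -1 else loopA lst2.length lst lst2 0
  | _, _ => 0  -- lst[0] / lst2[0] raises IndexError: outside Pre_solve

-- ===== PORT B =====
-- one round: walk cranes and boxes together; rem accumulates boxes no crane takes
def roundB (rem : List Int) (cs : List Int) (bs : List Int) : List Int :=
  match cs, bs with
  | _, [] => rem.reverse
  | [], bs => rem.reverse ++ bs
  | c :: cs', b :: bs' =>
      if b > c then roundB (b :: rem) (c :: cs') bs' else roundB rem cs' bs'
termination_by cs.length + bs.length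
decreasing_by all_goals (simp_all; try omega)

def loopB (fuel : Nat) (cs : List Int) (bs : List Int) (cnt : Int) : Int :=
  match fuel with
  | 0 => cnt
  | f + 1 => if bs = [] then cnt else loopB f cs (roundB [] cs bs) (cnt + 1)

def solve_alt (N : Int) (M : Int) (lst : List Int) (lst2 : List Int) : Int :=
  match PySem.List.pyGet? lst 0 with
  | none => 0  -- lst[0] raises IndexError: outside Pre_solve
  | some a =>
    match PySem.List.pyGet? lst2 0 with
    | none => 0
    | some b => if a < b then -1 else loopB lst2.length lst lst2 0

-- ===== PRECONDITION & SPEC =====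
-- Pre_ excludes empty lst/lst2 (A raises IndexError) and inputs that reach the
-- loading loop (lst[0] >= lst2[0]) with a list not sorted in non-increasing
-- order: the BOJ 1092 caller sorts both lists descending before calling solve,
-- and on unsorted input A's continue/remove iteration order gives accidental
-- round counts or diverges (the while loop never empties lst2).
def Pre_solve (N : Int) (M : Int) (lst : List Int) (lst2 : List Int) : Prop :=
  lst ≠ [] ∧ lst2 ≠ [] ∧
    (lst.headI < lst2.headI ∨ (List.Pairwise (· ≥ ·) lst ∧ List.Pairwise (· ≥ ·) lst2))
instance (N : Int) (M : Int) (lst : List Int) (lst2 : List Int) : Decidable (Pre_solve N M lst lst2) := by unfold Pre_solve; infer_instance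

def pvWitness_solve : Int × Int × List Int × List Int := (2, 3, [5, 3], [4, 2, 1])

def Spec_solve (N : Int) (M : Int) (lst : List Int) (lst2 : List Int) (out : Int) : Prop := out = solve_alt N M lst lst2
instance (N : Int) (M : Int) (lst : List Int) (lst2 : List Int) (out : Int) : Decidable (Spec_solve N M lst lst2 out) := by unfold Spec_solve; infer_instance

-- ===== CLAIM (what is proved, stated in full; the proofs are below) =====
def Claim_equal_solve : Prop := ∀ (N : Int) (M : Int) (lst : List Int) (lst2 : List Int), Dom_solve N M lst lst2 → Pre_solve N M lst lst2 → Spec_solve N M lst lst2 (solve N M lst lst2)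

-- ===== LEMMAS AND PROOFS =====

theorem findA_le {c j : Int} : ∀ {bs : List Int}, findA c bs = some j → j ≤ c := by
  intro bs
  induction bs with
  | nil => simp [findA]
  | cons y ys ih =>
      by_cases hy : c ≥ y
      · simp [findA, hy]; omega
      · simp [findA, hy]; exact ih

theorem findA_mem {c j : Int} : ∀ {bs : List Int}, findA c bs = some j → j ∈ bs := by
  intro bs
  induction bs with
  | nil => simp [findA]
  | cons y ys ih =>
      by_cases hy : c ≥ y
      · simp [findA, hy]; intro h; simp [h]
      · simp [findA, hy]; intro h; simp [ih h]

theorem stepA_nil (c : Int) : stepA [] c = [] := rfl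

theorem foldl_stepA_nil (cs : List Int) : List.foldl stepA [] cs = [] := by
  induction cs with
  | nil => rfl
  | cons c cs ih => simpa [stepA_nil] using ih

theorem innerA_cons_gt {b c : Int} (bs : List Int) (h : c < b) :
    innerA c (b :: bs) = b :: innerA c bs := by
  have hne : ¬ c ≥ b := not_le.mpr h
  unfold innerA
  rw [show findA c (b :: bs) = findA c bs by simp [findA, hne]]
  cases hf : findA c bs with
  | none => simp
  | some j =>
      have hj : j ≤ c := findA_le hf
      dsimp only
      rw [PySem.List.remove?_cons_of_ne bs (show b ≠ j by omega)]
      cases hr : PySem.List.remove? bs j <;> simp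

-- a crane strictly smaller than the head box leaves the head box alone
theorem stepA_cons_gt {b c : Int} (bs : List Int) (h : c < b) :
    stepA (b :: bs) c = b :: stepA bs c := by
  cases bs with
  | nil =>
      simp [stepA, PySem.List.pyGet?_neg_one, innerA, findA, not_le.mpr h]
  | cons x xs =>
      have hgl : (b :: x :: xs).getLast? = (x :: xs).getLast? := by
        simp [List.getLast?_cons_cons]
      simp only [stepA, PySem.List.pyGet?_neg_one, hgl]
      cases hL : (x :: xs).getLast? with
      | none => simp at hL
      | some L =>
          by_cases hcl : c < L
          · simp [hcl]
          · simp only [if_neg hcl, innerA_cons_gt _ h]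

-- on a non-increasing box list, a crane ≥ the head box takes exactly the head
theorem stepA_cons_le {b c : Int} (bs : List Int)
    (hs : List.Pairwise (· ≥ ·) (b :: bs)) (h : b ≤ c) :
    stepA (b :: bs) c = bs := by
  have hlast : ∀ L, (b :: bs).getLast? = some L → L ≤ b := by
    intro L hL
    rcases List.mem_cons.mp (List.mem_of_getLast? hL) with h' | hmem
    · exact le_of_eq h'
    · exact (List.pairwise_cons.mp hs).1 L hmem
  cases hL : (b :: bs).getLast? with
  | none => simp at hL
  | some L =>
      have hcl : ¬ c < L := by have := hlast L hL; omega
      simp [stepA, PySem.List.pyGet?_neg_one, hL, hcl, innerA, findA, h]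

theorem foldl_stepA_cons_gt {b : Int} (cs bs : List Int) (h : ∀ x ∈ cs, x < b) :
    List.foldl stepA (b :: bs) cs = b :: List.foldl stepA bs cs := by
  induction cs generalizing bs with
  | nil => rfl
  | cons c cs ih =>
      rw [List.foldl_cons, List.foldl_cons, stepA_cons_gt bs (h c (by simp)),
        ih _ (fun x hx => h x (by simp [hx]))]

-- the key round lemma: A's fold of stepA over the cranes equals B's sweep
theorem roundB_eq (rem cs bs : List Int) :
    List.Pairwise (· ≥ ·) cs → List.Pairwise (· ≥ ·) bs →
      roundB rem cs bs = rem.reverse ++ List.foldl stepA bs cs := by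
  induction rem, cs, bs using roundB.induct with
  | case1 rem cs => intro _ _; simp [roundB, foldl_stepA_nil]
  | case2 rem bs _ => intro _ _; simp [roundB]
  | case3 rem c cs' b bs' hgt ih =>
      intro hcs hbs
      rw [roundB, if_pos hgt, ih hcs (List.pairwise_cons.mp hbs).2]
      have hall : ∀ x ∈ c :: cs', x < b := by
        intro x hx
        rcases List.mem_cons.mp hx with rfl | hx
        · omega
        · have := (List.pairwise_cons.mp hcs).1 x hx; omega
      rw [foldl_stepA_cons_gt _ _ hall]
      simp
  | case4 rem c cs' b bs' hgt ih =>
      intro hcs hbs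
      rw [roundB, if_neg hgt,
        ih (List.pairwise_cons.mp hcs).2 (List.pairwise_cons.mp hbs).2,
        List.foldl_cons, stepA_cons_le _ hbs (by omega)]

-- stepA only removes elements, so sortedness is preserved
theorem stepA_sublist (bs : List Int) (c : Int) : (stepA bs c).Sublist bs := by
  have hinner : (innerA c bs).Sublist bs := by
    unfold innerA
    cases hf : findA c bs with
    | none => simp
    | some j =>
        dsimp only
        rw [PySem.List.remove?_eq_some_erase bs j (findA_mem hf)]
        simpa using List.erase_sublist
  unfold stepA
  cases (PySem.List.pyGet? bs (-1)) with
  | none => exact hinner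
  | some L => by_cases hcl : c < L <;> simp [hcl, hinner]

theorem foldl_stepA_sublist (cs bs : List Int) : (List.foldl stepA bs cs).Sublist bs := by
  induction cs generalizing bs with
  | nil => simp
  | cons c cs ih => exact (ih (stepA bs c)).trans (stepA_sublist bs c)

theorem loop_eq (cs : List Int) (hcs : List.Pairwise (· ≥ ·) cs) :
    ∀ (fuel : Nat) (bs : List Int) (cnt : Int), List.Pairwise (· ≥ ·) bs →
      loopA fuel cs bs cnt = loopB fuel cs bs cnt := by
  intro fuel
  induction fuel with
  | zero => intro bs cnt _; rfl
  | succ f ih =>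
      intro bs cnt hbs
      by_cases hb : bs = []
      · simp [loopA, loopB, hb]
      · rw [loopA, loopB, if_neg hb, if_neg hb, roundB_eq [] cs bs hcs hbs,
          List.reverse_nil, List.nil_append]
        exact ih _ _ (hbs.sublist (foldl_stepA_sublist cs bs))

-- ===== VERDICT (by name: the statement is the Claim_ definition above) =====
theorem solve_spec : Claim_equal_solve := by
  intro N M lst lst2 _ hpre
  obtain ⟨h1, h2, hs⟩ := hpre
  obtain ⟨a, lst, rfl⟩ := List.exists_cons_of_ne_nil h1
  obtain ⟨b, lst2, rfl⟩ := List.exists_cons_of_ne_nil h2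
  unfold Spec_solve solve solve_alt
  rw [PySem.List.pyGet?_zero_cons, PySem.List.pyGet?_zero_cons]
  by_cases hab : a < b
  · simp [hab]
  · obtain ⟨hs1, hs2⟩ : List.Pairwise (· ≥ ·) (a :: lst) ∧ List.Pairwise (· ≥ ·) (b :: lst2) := by
      rcases hs with h | h
      · simp [List.headI] at h; omega
      · exact h
    simp only [if_neg hab]
    exact loop_eq _ hs1 _ _ _ hs2
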